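-- pv_equiv track=rewrite | github.com/kangyimin/HGACN | explain_sanity.py | _extract_pair_ids
-- ===== SOURCE A (Python) =====
-- def _extract_pair_ids(extra):
--     drug_id = None
--     prot_id = None
--     for i, tok in enumerate(extra):
--         if tok == "--drug_id" and i + 1 < len(extra):
--             drug_id = extra[i + 1]
--         if tok == "--prot_id" and i + 1 < len(extra):
--             prot_id = extra[i + 1]
--     return drug_id, prot_id
-- ===== SOURCE B (Python) =====
-- def _extract_pair_ids(extra):
--     # Search the adjacent-pair list from the END: the first match in reverse
--     # order is the successor of the LAST occurrence of the flag.
--     pairs = list(zip(extra, extra[1:]))[::-1]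
--
--     def first_after(flag):
--         return next((nxt for tok, nxt in pairs if tok == flag), None)
--
--     return first_after("--drug_id"), first_after("--prot_id")
-- ===== Notes on version B (the rewrite author's own statement) =====
-- stated objective: idiomatic
-- what changed: Instead of a forward pass with two guarded in-loop updates, B builds the adjacent-pair list, reverses it, and for each flag takes the FIRST matching successor via next(...)/find-first; first match in reverse order equals A's last-occurrence-wins, and a trailing flag never forms a pair, matching the i+1<len guard.
import Mathlib
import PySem

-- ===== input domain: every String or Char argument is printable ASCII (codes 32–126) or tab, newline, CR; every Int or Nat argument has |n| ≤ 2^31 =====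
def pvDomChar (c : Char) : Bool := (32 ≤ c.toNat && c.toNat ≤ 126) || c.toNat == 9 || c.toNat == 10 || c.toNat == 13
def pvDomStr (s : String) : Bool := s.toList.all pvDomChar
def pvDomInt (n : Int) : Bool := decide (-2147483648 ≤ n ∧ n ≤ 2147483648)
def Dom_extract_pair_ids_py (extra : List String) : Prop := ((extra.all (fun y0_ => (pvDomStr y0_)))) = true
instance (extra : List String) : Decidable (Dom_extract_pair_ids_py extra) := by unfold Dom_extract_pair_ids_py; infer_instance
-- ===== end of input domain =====

-- B replaces A's forward index-guarded flag loop by a backward first-match search over the reversed adjacent-pair list (idiomatic).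


-- ===== PORT A =====
-- loop body of A: two guarded updates of the (drug_id, prot_id) accumulator
def pvStepA (extra : List String) (st : Option String × Option String) (p : Int × String) :
    Option String × Option String :=
  let st1 := if p.2 = "--drug_id" ∧ p.1 + 1 < (extra.length : Int) then
      (PySem.List.pyGet? extra (p.1 + 1), st.2) else st
  if p.2 = "--prot_id" ∧ p.1 + 1 < (extra.length : Int) then
      (st1.1, PySem.List.pyGet? extra (p.1 + 1)) else st1

def extract_pair_ids_py (extra : List String) : Option String × Option String :=
  (PySem.List.enumerate extra).foldl (pvStepA extra) (none, none)

-- ===== PORT B =====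
-- zip(extra, extra[1:]) = extra.zip extra.tail (exact); [::-1] = List.reverse;
-- next((nxt for tok, nxt in pairs if tok == flag), None) = first match = List.find? + .map
def pvFirstAfter (pairs : List (String × String)) (flag : String) : Option String :=
  (pairs.find? (fun p => p.1 == flag)).map (·.2)

def extract_pair_ids_py_alt (extra : List String) : Option String × Option String :=
  let pairs := (extra.zip extra.tail).reverse
  (pvFirstAfter pairs "--drug_id", pvFirstAfter pairs "--prot_id")

-- ===== PRECONDITION & SPEC =====
def Spec_extract_pair_ids_py (extra : List String) (out : Option String × Option String) : Prop := out = extract_pair_ids_py_alt extra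
instance (extra : List String) (out : Option String × Option String) : Decidable (Spec_extract_pair_ids_py extra out) := by unfold Spec_extract_pair_ids_py; infer_instance

-- ===== CLAIM (what is proved, stated in full; the proofs are below) =====
def Claim_equal_extract_pair_ids_py : Prop := ∀ (extra : List String), Dom_extract_pair_ids_py extra → Spec_extract_pair_ids_py extra (extract_pair_ids_py extra)

-- ===== LEMMAS AND PROOFS =====

-- value after the LAST pair of ps whose key is k (proof-only helper)
def pvLastVal (ps : List (String × String)) (k : String) : Option String :=
  match ps with
  | [] => none
  | p :: t =>
    match pvLastVal t k with
    | some v => some v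
    | none => if p.1 = k then some p.2 else none

theorem pvLastVal_eq_firstAfter_rev (ps : List (String × String)) (k : String) :
    pvLastVal ps k = pvFirstAfter ps.reverse k := by
  induction ps with
  | nil => simp [pvLastVal, pvFirstAfter]
  | cons p t ih =>
    simp only [pvLastVal, ih, List.reverse_cons, pvFirstAfter, List.find?_append]
    cases h : t.reverse.find? (fun q => q.1 == k) with
    | some v => simp
    | none =>
      by_cases hk : p.1 = k
      · simp [List.find?, hk]
      · simp [List.find?, hk]
        simp [show (p.1 == k) = false from by simpa using hk]

theorem pvFoldA_eq (extra : List String) (xs : List String) (s : Nat)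
    (acc : Option String × Option String)
    (hget : ∀ j : Nat, xs[j]? = extra[s + j]?)
    (hlen : s + xs.length = extra.length) :
    (PySem.List.enumerate xs (s : Int)).foldl (pvStepA extra) acc
      = ((match pvLastVal (xs.zip xs.tail) "--drug_id" with
          | some v => some v | none => acc.1),
         (match pvLastVal (xs.zip xs.tail) "--prot_id" with
          | some v => some v | none => acc.2)) := by
  induction xs generalizing s acc with
  | nil => simp [PySem.List.enumerate_nil, pvLastVal]
  | cons x xt ih =>
    rw [PySem.List.enumerate_cons, List.foldl_cons]
    have hcast : (s : Int) + 1 = ((s + 1 : Nat) : Int) := by push_cast; ring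
    cases xt with
    | nil =>
      have hguard : ¬ ((s : Int) + 1 < (extra.length : Int)) := by
        simp at hlen; omega
      simp [PySem.List.enumerate_nil, pvStepA, hguard, pvLastVal]
    | cons y yt =>
      have hguard : (s : Int) + 1 < (extra.length : Int) := by
        simp at hlen; omega
      have hy : PySem.List.pyGet? extra ((s : Int) + 1) = some y := by
        rw [hcast, PySem.List.pyGet?_natCast]
        have := hget 1
        simpa using this.symm
      have hrest : ∀ j : Nat, (y :: yt)[j]? = extra[s + 1 + j]? := by
        intro j
        have := hget (j + 1)
        simpa [Nat.add_assoc, Nat.add_comm 1 j] using this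
      have hlen' : s + 1 + (y :: yt).length = extra.length := by
        simp at hlen ⊢; omega
      rw [hcast, ih (s + 1) (pvStepA extra acc ((s : Int), x)) hrest hlen']
      simp only [List.tail_cons, List.zip_cons_cons]
      have hstep : pvStepA extra acc ((s : Int), x)
          = ((if x = "--drug_id" then some y else acc.1),
             (if x = "--prot_id" then some y else acc.2)) := by
        by_cases hd : x = "--drug_id" <;> by_cases hp : x = "--prot_id" <;>
          simp [pvStepA, hd, hp, hguard, hy]
      rw [hstep]
      by_cases hd : x = "--drug_id" <;> by_cases hp : x = "--prot_id" <;>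
        cases h1 : pvLastVal ((y :: yt).zip yt) "--drug_id" <;>
          cases h2 : pvLastVal ((y :: yt).zip yt) "--prot_id" <;>
            simp [pvLastVal, h1, h2, hd, hp]

-- ===== VERDICT (by name: the statement is the Claim_ definition above) =====
theorem extract_pair_ids_py_spec : Claim_equal_extract_pair_ids_py := by
  intro extra _
  unfold Spec_extract_pair_ids_py extract_pair_ids_py
  have hA := pvFoldA_eq extra extra 0 (none, none) (by intro j; simp) (by simp)
  simp only [Nat.cast_zero] at hA
  rw [hA]
  simp only [extract_pair_ids_py_alt, pvLastVal_eq_firstAfter_rev]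
  cases h1 : pvFirstAfter ((extra.zip extra.tail).reverse) "--drug_id" <;>
    cases h2 : pvFirstAfter ((extra.zip extra.tail).reverse) "--prot_id" <;> simp
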